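-- pv_equiv track=rewrite | github.com/thk-cheng/advent-of-code | 2015/day_01_solution_part_01.py | count_floor
-- ===== SOURCE A (Python) =====
-- def count_floor(instructions: str) -> int:
--     floor = 0
--     for p in instructions:
--         if p == "(":
--             floor += 1
--         else:
--             floor -= 1
--     return floor
-- ===== SOURCE B (Python) =====
-- def count_floor(instructions: str) -> int:
--     return 2 * instructions.count("(") - len(instructions)
-- ===== Notes on version B (the rewrite author's own statement) =====
-- stated objective: faster
-- what changed: Replaces the per-character branching accumulator loop with a branchless closed form, 2 times the count of opening parens minus the string length, valid since every other character contributes -1.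
import Mathlib
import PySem

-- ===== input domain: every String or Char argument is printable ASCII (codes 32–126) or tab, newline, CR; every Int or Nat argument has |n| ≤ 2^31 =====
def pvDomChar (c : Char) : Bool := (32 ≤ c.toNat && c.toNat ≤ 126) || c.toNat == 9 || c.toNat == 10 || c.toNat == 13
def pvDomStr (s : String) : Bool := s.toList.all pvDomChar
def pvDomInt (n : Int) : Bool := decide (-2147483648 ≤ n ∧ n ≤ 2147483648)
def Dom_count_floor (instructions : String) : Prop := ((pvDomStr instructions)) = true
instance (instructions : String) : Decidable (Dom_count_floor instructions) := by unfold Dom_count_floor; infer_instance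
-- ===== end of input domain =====

-- B replaces A's per-character branching accumulator loop with the closed form 2*count('(') - len (simpler, branchless).


-- ===== PORT A =====
-- for p in instructions: if p == "(": floor += 1 else: floor -= 1
def count_floor (instructions : String) : Int :=
  instructions.toList.foldl (fun floor p => if p == '(' then floor + 1 else floor - 1) 0

-- ===== PORT B =====
-- return 2 * instructions.count("(") - len(instructions)
def count_floor_alt (instructions : String) : Int :=
  2 * (PySem.Str.count instructions "(" : Int) - PySem.Str.len instructions

-- ===== PRECONDITION & SPEC =====
def Spec_count_floor (instructions : String) (out : Int) : Prop := out = count_floor_alt instructions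
instance (instructions : String) (out : Int) : Decidable (Spec_count_floor instructions out) := by unfold Spec_count_floor; infer_instance

-- ===== CLAIM (what is proved, stated in full; the proofs are below) =====
def Claim_equal_count_floor : Prop := ∀ (instructions : String), Dom_count_floor instructions → Spec_count_floor instructions (count_floor instructions)

-- ===== LEMMAS AND PROOFS =====

-- counting occurrences of the one-character substring [c] equals counting the character c
theorem count_go_singleton (c : Char) (fuel : Nat) : ∀ (cs : List Char) (acc : Nat), cs.length ≤ fuel →
    PySem.Chars.count.go [c] fuel cs acc = acc + cs.count c := by
  induction fuel with
  | zero => intro cs acc h; simp at h; simp [h, PySem.Chars.count.go]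
  | succ n ih =>
    intro cs acc h
    cases cs with
    | nil => simp [PySem.Chars.count.go]
    | cons x t =>
      rw [PySem.Chars.count.go]
      by_cases hx : x = c
      · simp [hx, List.isPrefixOf, ih t (acc + 1) (by simpa using h)]
        omega
      · simp [List.isPrefixOf, hx, Ne.symm hx, ih t acc (by simpa using h)]

theorem chars_count_singleton (cs : List Char) (c : Char) :
    PySem.Chars.count cs [c] = cs.count c := by
  simp [PySem.Chars.count, count_go_singleton c cs.length cs 0 le_rfl]

-- A's loop computes a + 2*(count of '(') - length, for any accumulator a
theorem loop_closed (cs : List Char) (a : Int) :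
    cs.foldl (fun floor p => if p == '(' then floor + 1 else floor - 1) a
      = a + 2 * (cs.count '(' : Int) - cs.length := by
  induction cs generalizing a with
  | nil => simp
  | cons x xs ih =>
    simp only [List.foldl_cons, ih, List.count_cons, List.length_cons]
    by_cases h : x = '('
    · simp [h]; ring
    · simp [h]; ring

-- ===== VERDICT (by name: the statement is the Claim_ definition above) =====
theorem count_floor_spec : Claim_equal_count_floor := by
  intro s _
  unfold Spec_count_floor count_floor count_floor_alt
  rw [loop_closed]
  simp [chars_count_singleton]
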